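-- pv_equiv track=rewrite | github.com/anders-ahsman/advent-of-code | 2018/day7/main.py | calc_step_order
-- ===== SOURCE A (Python) =====
-- def calc_step_order(requirements):
--     order = ''
--
--     steps = get_unique_steps(requirements)
--     while len(steps) > 0:
--         steps_available = get_steps_only_left_side(steps, requirements)
--         step_added = steps_available[0]
--         order += step_added
--         steps.remove(step_added)
--         requirements = [r for r in requirements if r[0] != step_added]
--
--     return order
--
-- def get_unique_steps(requirements):
--     unique_steps = set()
--     for r in requirements:
--         unique_steps.add(r[0])
--         unique_steps.add(r[1])
--     return unique_steps
--
-- def get_steps_only_left_side(steps, requirements):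
--     only_left = []
--     for step in steps:
--         if not [r for r in requirements if r[1] == step]:
--             only_left.append(step)
--     only_left.sort()
--     return only_left
-- ===== SOURCE B (Python) =====
-- def calc_step_order(requirements):
--     # Kahn's algorithm: build indegrees and adjacency once, then repeatedly
--     # take the smallest available step, decrementing successors' indegrees.
--     indeg = {}
--     succs = {}
--     for a, b in requirements:
--         indeg.setdefault(a, 0)
--         indeg[b] = indeg.get(b, 0) + 1
--         succs.setdefault(a, []).append(b)
--
--     avail = [s for s, d in indeg.items() if d == 0]
--     order = []
--     while avail:
--         s = min(avail)
--         avail.remove(s)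
--         order.append(s)
--         for t in succs.get(s, []):
--             indeg[t] -= 1
--             if indeg[t] == 0:
--                 avail.append(t)
--     return ''.join(order)
-- ===== Notes on version B (the rewrite author's own statement) =====
-- stated objective: faster
-- what changed: Replaces A's per-round rescan (each iteration filters every remaining step against every remaining requirement and re-sorts) with Kahn's algorithm: adjacency lists and indegrees are built once, and each round takes the minimum of an incrementally maintained zero-indegree pool, decrementing successors' indegrees, so each edge is touched once.
import Mathlib
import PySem

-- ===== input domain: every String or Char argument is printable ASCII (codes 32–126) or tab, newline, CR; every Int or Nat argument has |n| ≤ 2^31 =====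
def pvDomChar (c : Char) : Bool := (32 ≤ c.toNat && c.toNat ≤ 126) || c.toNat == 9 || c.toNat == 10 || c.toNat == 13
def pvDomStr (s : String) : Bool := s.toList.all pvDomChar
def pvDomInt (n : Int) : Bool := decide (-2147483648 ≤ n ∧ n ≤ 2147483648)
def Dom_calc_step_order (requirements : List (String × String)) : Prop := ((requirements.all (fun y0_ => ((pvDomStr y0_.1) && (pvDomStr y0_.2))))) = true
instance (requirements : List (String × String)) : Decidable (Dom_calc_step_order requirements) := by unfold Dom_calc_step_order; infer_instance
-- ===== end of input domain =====

-- B replaces A's per-round rescan-and-resort of all remaining steps with Kahn's algorithm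
-- (indegrees/adjacency built once, min of an incrementally maintained zero-indegree pool): faster.

-- ===== PORT A =====
def getUniqueSteps (requirements : List (String × String)) : PySem.Set String :=
  requirements.foldl (fun s r => PySem.Set.add (PySem.Set.add s r.1) r.2) PySem.Set.empty

def getStepsOnlyLeftSide (steps : List String) (requirements : List (String × String)) : List String :=
  PySem.List.sorted
    (steps.foldl (fun acc step =>
      if (requirements.filter (fun r => r.2 == step)).isEmpty then acc ++ [step] else acc) [])
    (fun s => s)

def aLoop : Nat → String → List String → List (String × String) → String
  | 0, order, _, _ => order
  | fuel+1, order, steps, requirements =>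
    if steps.length > 0 then
      match getStepsOnlyLeftSide steps requirements with
      | [] => order   -- Python: steps_available[0] raises IndexError here (outside Pre_)
      | step_added :: _ =>
        match PySem.Set.remove? steps step_added with
        | none => order  -- unreachable: step_added ∈ steps
        | some steps' =>
          aLoop fuel (order ++ step_added) steps'
            (requirements.filter (fun r => !(r.1 == step_added)))
    else order

def calc_step_order (requirements : List (String × String)) : String :=
  let steps := getUniqueSteps requirements
  aLoop steps.length "" steps requirements

-- ===== PORT B =====
def bBuildStepInd (d : PySem.Dict String Int) (r : String × String) : PySem.Dict String Int :=
  let d1 := d.setdefault r.1 0                 -- indeg.setdefault(a, 0)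
  d1.insert r.2 (d1.getD r.2 0 + 1)            -- indeg[b] = indeg.get(b, 0) + 1

def bBuildStepSuc (d : PySem.Dict String (List String)) (r : String × String) :
    PySem.Dict String (List String) :=
  d.modify r.1 [] (fun l => l ++ [r.2])        -- succs.setdefault(a, []).append(b)

def bDecStep (q : PySem.Dict String Int × List String) (t : String) :
    PySem.Dict String Int × List String :=
  (q.1.modify t 0 (fun v => v - 1),            -- indeg[t] -= 1
   if (q.1.modify t 0 (fun v => v - 1)).getD t 0 == 0 then q.2 ++ [t] else q.2)
                                               -- if indeg[t] == 0: avail.append(t)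

def bLoop : Nat → List String → List String → PySem.Dict String Int →
    PySem.Dict String (List String) → List String
  | 0, order, _, _, _ => order
  | fuel+1, order, avail, indeg, succs =>
    match PySem.List.min? avail (fun s => s) with
    | none => order                                           -- while avail: exits
    | some s =>
      let avail1 := (PySem.List.remove? avail s).getD avail   -- avail.remove(s)
      let q := (succs.getD s []).foldl bDecStep (indeg, avail1)
      bLoop fuel (order ++ [s]) q.2 q.1 succs

def calc_step_order_alt (requirements : List (String × String)) : String :=
  let built := requirements.foldl
    (fun st r => (bBuildStepInd st.1 r, bBuildStepSuc st.2 r))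
    (PySem.Dict.empty, PySem.Dict.empty)
  let avail := (built.1.items.filter (fun p => p.2 == 0)).map (fun p => p.1)
  PySem.Str.join "" (bLoop built.1.size [] avail built.1 built.2)

-- ===== PRECONDITION & SPEC =====
-- nodes reachable from the accumulated set in at most `fuel` more edge-steps
def pvReachFrom (requirements : List (String × String)) : Nat → List String → List String
  | 0, acc => acc
  | n+1, acc =>
      pvReachFrom requirements n
        (acc ++ (((requirements.filter (fun r => acc.contains r.1)).map (fun r => r.2)).filter
          (fun t => !acc.contains t)))

-- Pre_ excludes exactly the inputs whose dependency graph contains a cycle (including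
-- self-loops): on those, once only cyclic steps remain, A's 'steps_available[0]' raises
-- IndexError, so A returns no value there.
def Pre_calc_step_order (requirements : List (String × String)) : Prop :=
  ∀ r ∈ requirements, r.1 ∉ pvReachFrom requirements requirements.length [r.2]

instance (requirements : List (String × String)) : Decidable (Pre_calc_step_order requirements) := by
  unfold Pre_calc_step_order; infer_instance

def pvWitness_calc_step_order : (List (String × String)) :=
  [("A", "B"), ("A", "C"), ("B", "C")]

def Spec_calc_step_order (requirements : List (String × String)) (out : String) : Prop :=
  out = calc_step_order_alt requirements
instance (requirements : List (String × String)) (out : String) :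
    Decidable (Spec_calc_step_order requirements out) := by
  unfold Spec_calc_step_order; infer_instance

-- ===== CLAIM (what is proved, stated in full; the proofs are below) =====
def Claim_equal_calc_step_order : Prop := ∀ (requirements : List (String × String)), Dom_calc_step_order requirements → Pre_calc_step_order requirements → Spec_calc_step_order requirements (calc_step_order requirements)


-- ===== LEMMAS AND PROOFS =====

-- incoming-degree of t in a requirement list (proof-only abbreviation)
def inDegN (requirements : List (String × String)) (t : String) : Nat :=
  requirements.countP (fun r => r.2 == t)

-- the invariant tying A's state (steps, requirements) to B's state (avail, indeg, succs)
def InvP (steps : List String) (reqs : List (String × String)) (avail : List String)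
    (indeg : PySem.Dict String Int) (succs : PySem.Dict String (List String)) : Prop :=
  steps.Nodup ∧ avail.Nodup ∧
  (∀ t, t ∈ avail ↔ t ∈ steps ∧ inDegN reqs t = 0) ∧
  (∀ t, t ∈ steps → indeg.getD t 0 = (inDegN reqs t : Int)) ∧
  (∀ s, s ∈ steps → succs.getD s [] = (reqs.filter (fun r => r.1 == s)).map (fun r => r.2)) ∧
  (∀ r ∈ reqs, r.1 ∈ steps ∧ r.2 ∈ steps)

lemma countP_split (l : List (String × String)) (p q : String × String → Bool) :
    l.countP p = l.countP (fun a => p a && q a) + l.countP (fun a => p a && !q a) := by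
  induction l with
  | nil => simp
  | cons x xs ih =>
    by_cases hp : p x <;> by_cases hq : q x <;>
      simp [hp, hq, ih] <;> omega

lemma remove?_eq_some_erase (xs : List String) (x : String) (h : x ∈ xs) :
    PySem.List.remove? xs x = some (xs.erase x) := by
  induction xs with
  | nil => cases h
  | cons y ys ih =>
    by_cases hy : y = x
    · subst hy
      simp [PySem.List.remove?, List.idxOf?_cons]
    · have hx : x ∈ ys := by
        rcases List.mem_cons.mp h with h' | h'
        · exact absurd h'.symm hy
        · exact h'
      have hih := ih hx
      have hbeq : (y == x) = false := by simp [hy]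
      simp only [PySem.List.remove?, List.idxOf?_cons, hbeq, Bool.false_eq_true, if_false,
        List.erase_cons, Option.map_map] at hih ⊢
      rcases hidx : List.idxOf? x ys with _ | k
      · rw [hidx] at hih; simp at hih
      · rw [hidx] at hih
        simp only [Option.map_some, Option.some.injEq, Function.comp] at hih ⊢
        rw [List.eraseIdx_cons_succ, hih]

lemma mem_steps_fold (l : List (String × String)) (s : PySem.Set String) (t : String) :
    t ∈ l.foldl (fun s r => PySem.Set.add (PySem.Set.add s r.1) r.2) s ↔
      t ∈ s ∨ ∃ r ∈ l, r.1 = t ∨ r.2 = t := by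
  induction l generalizing s with
  | nil => simp
  | cons r l ih =>
    simp only [List.foldl_cons, ih, PySem.Set.mem_add, List.mem_cons]
    constructor
    · rintro (((h | h) | h) | ⟨r', hr', h⟩)
      · exact Or.inl h
      · exact Or.inr ⟨r, Or.inl rfl, Or.inl h.symm⟩
      · exact Or.inr ⟨r, Or.inl rfl, Or.inr h.symm⟩
      · exact Or.inr ⟨r', Or.inr hr', h⟩
    · rintro (h | ⟨r', (rfl | hr'), h⟩)
      · exact Or.inl (Or.inl (Or.inl h))
      · rcases h with h | h
        · exact Or.inl (Or.inl (Or.inr h.symm))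
        · exact Or.inl (Or.inr h.symm)
      · exact Or.inr ⟨r', hr', h⟩

lemma nodup_steps_fold (l : List (String × String)) (s : PySem.Set String) (h : s.Nodup) :
    (l.foldl (fun s r => PySem.Set.add (PySem.Set.add s r.1) r.2) s).Nodup := by
  induction l generalizing s with
  | nil => exact h
  | cons r l ih =>
    exact ih _ (PySem.Set.nodup_add _ r.2 (PySem.Set.nodup_add s r.1 h))

lemma set_add_eq (s : PySem.Set String) (x : String) :
    PySem.Set.add s x = if x ∈ s then s else s ++ [x] := by
  simp [PySem.Set.add, PySem.Set.contains]

lemma getD_setdefault_zero (d : PySem.Dict String Int) (k u : String) :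
    (d.setdefault k 0).getD u 0 = d.getD u 0 := by
  by_cases hu : u = k
  · subst hu; rw [PySem.Dict.getD_setdefault_self]
  · rw [PySem.Dict.getD_eq_get?_getD, PySem.Dict.get?_setdefault_of_ne _ _ hu,
      ← PySem.Dict.getD_eq_get?_getD]

lemma keys_bBuildStepInd (d : PySem.Dict String Int) (r : String × String) :
    (bBuildStepInd d r).keys = PySem.Set.add (PySem.Set.add d.keys r.1) r.2 := by
  unfold bBuildStepInd
  have hks : (d.setdefault r.1 0).keys = PySem.Set.add d.keys r.1 := by
    rw [PySem.Dict.keys_setdefault, set_add_eq]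
    by_cases h : d.contains r.1 = true
    · rw [if_pos h, if_pos ((PySem.Dict.contains_iff_mem_keys d r.1).mp h)]
    · rw [if_neg h, if_neg (fun hm => h ((PySem.Dict.contains_iff_mem_keys d r.1).mpr hm))]
  by_cases h2 : (d.setdefault r.1 0).contains r.2 = true
  · have hmem := (PySem.Dict.contains_iff_mem_keys _ r.2).mp h2
    rw [hks] at hmem
    rw [PySem.Dict.keys_insert_of_contains _ _ h2, hks,
      set_add_eq (PySem.Set.add d.keys r.1) r.2, if_pos hmem]
  · have hmem : r.2 ∉ PySem.Set.add d.keys r.1 := by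
      intro hm
      rw [← hks] at hm
      exact h2 ((PySem.Dict.contains_iff_mem_keys _ r.2).mpr hm)
    rw [PySem.Dict.keys_insert_of_not_contains _ _ (by simpa using h2), hks,
      set_add_eq (PySem.Set.add d.keys r.1) r.2, if_neg hmem]

lemma keys_build (l : List (String × String)) (d : PySem.Dict String Int) :
    (l.foldl bBuildStepInd d).keys =
      l.foldl (fun s r => PySem.Set.add (PySem.Set.add s r.1) r.2) d.keys := by
  induction l generalizing d with
  | nil => rfl
  | cons r l ih => simp only [List.foldl_cons, ih, keys_bBuildStepInd]

lemma getD_bBuildStepInd (d : PySem.Dict String Int) (r : String × String) (t : String) :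
    (bBuildStepInd d r).getD t 0 = if t = r.2 then d.getD t 0 + 1 else d.getD t 0 := by
  unfold bBuildStepInd
  rw [PySem.Dict.getD_insert]
  by_cases h : t = r.2
  · rw [if_pos h, if_pos h, getD_setdefault_zero, h]
  · rw [if_neg h, if_neg h, getD_setdefault_zero]

lemma getD_build (l : List (String × String)) (d : PySem.Dict String Int) (t : String) :
    (l.foldl bBuildStepInd d).getD t 0 = d.getD t 0 + (inDegN l t : Int) := by
  induction l generalizing d with
  | nil => simp [inDegN]
  | cons r l ih =>
    simp only [List.foldl_cons, ih, getD_bBuildStepInd, inDegN, List.countP_cons]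
    by_cases h : t = r.2
    · have hb : (r.2 == t) = true := by simp [h]
      simp only [if_pos h, hb, if_true]
      push_cast; ring
    · have hb : (r.2 == t) = false := by simp [beq_iff_eq]; exact fun e => h e.symm
      simp only [if_neg h, hb, Bool.false_eq_true, if_false, Nat.add_zero]

lemma head_sorted_eq_min (L M : List String) (hmem : ∀ x, x ∈ L ↔ x ∈ M)
    (hd : String) (tl : List String)
    (hs : PySem.List.sorted L (fun s => s) = hd :: tl)
    (m : String) (hm : PySem.List.min? M (fun s => s) = some m) : hd = m := by
  have hperm := PySem.List.sorted_perm L (fun s => s) false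
  rw [hs] at hperm
  have hhdL : hd ∈ L := hperm.mem_iff.mp (by simp)
  have hmle : m ≤ hd := PySem.List.min?_isMin hm hd ((hmem hd).mp hhdL)
  have hmM : m ∈ M := PySem.List.min?_mem hm
  have hmsorted : m ∈ hd :: tl := hperm.mem_iff.mpr ((hmem m).mpr hmM)
  have hpw := PySem.List.sorted_pairwise L (fun s : String => s)
  rw [hs] at hpw
  rcases List.mem_cons.mp hmsorted with h | h
  · exact h.symm
  · exact le_antisymm (List.rel_of_pairwise_cons hpw h) hmle

lemma fold_dec (bs : List String) (d : PySem.Dict String Int) (av : List String)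
    (hcnt : ∀ t ∈ bs, (bs.count t : Int) ≤ d.getD t 0)
    (hav : ∀ t ∈ av, d.getD t 0 = 0)
    (hnd : av.Nodup) :
    (∀ u, (bs.foldl bDecStep (d, av)).1.getD u 0 = d.getD u 0 - (bs.count u : Int)) ∧
    (∀ u, u ∈ (bs.foldl bDecStep (d, av)).2 ↔
        u ∈ av ∨ (u ∈ bs ∧ d.getD u 0 = (bs.count u : Int))) ∧
    (bs.foldl bDecStep (d, av)).2.Nodup := by
  induction bs generalizing d av with
  | nil => exact ⟨fun u => by simp, fun u => by simp, hnd⟩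
  | cons t rest ih =>
    have hcts : ((t :: rest).count t : Int) = (rest.count t : Int) + 1 := by
      rw [List.count_cons_self]; push_cast; ring
    have hdt : (1 : Int) ≤ d.getD t 0 := by
      have h1 := hcnt t (by simp)
      omega
    have htav : t ∉ av := by
      intro hmem
      have := hav t hmem
      omega
    have hgd' : ∀ u, (d.modify t 0 (fun v => v - 1)).getD u 0 =
        if u = t then d.getD t 0 - 1 else d.getD u 0 := by
      intro u; rw [PySem.Dict.getD_modify]
    have hstep : (t :: rest).foldl bDecStep (d, av) =
        rest.foldl bDecStep (d.modify t 0 (fun v => v - 1),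
          if (d.modify t 0 (fun v => v - 1)).getD t 0 == 0 then av ++ [t] else av) := rfl
    set d' := d.modify t 0 (fun v => v - 1) with hd'
    set av' := if d'.getD t 0 == 0 then av ++ [t] else av with hav'
    have hmemav' : ∀ u, u ∈ av' ↔ u ∈ av ∨ (u = t ∧ d.getD t 0 = 1) := by
      intro u
      rw [hav']
      by_cases hz : d'.getD t 0 = 0
      · have h1 : d.getD t 0 = 1 := by have := hgd' t; simp at this; omega
        simp [hz, h1, List.mem_append]
      · have h1 : d.getD t 0 ≠ 1 := by have := hgd' t; simp at this; omega
        have hb : (d'.getD t 0 == 0) = false := by simpa using hz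
        simp [hb, h1]
    have hcnt2 : ∀ u ∈ rest, ((rest.count u : Int)) ≤ d'.getD u 0 := by
      intro u hu
      rw [hgd']
      by_cases hut : u = t
      · subst hut
        have := hcnt u (by simp)
        rw [if_pos rfl]
        omega
      · rw [if_neg hut]
        have hc := hcnt u (List.mem_cons_of_mem _ hu)
        have : (t :: rest).count u = rest.count u := List.count_cons_of_ne (by exact fun e => hut e.symm) 
        omega
    have hav2 : ∀ u ∈ av', d'.getD u 0 = 0 := by
      intro u hu
      rcases (hmemav' u).mp hu with h | ⟨rfl, h1⟩
      · have hut : u ≠ t := fun e => htav (e ▸ h)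
        rw [hgd', if_neg hut]
        exact hav u h
      · rw [hgd', if_pos rfl]; omega
    have hnd2 : av'.Nodup := by
      rw [hav']
      by_cases hz : (d'.getD t 0 == 0) = true
      · rw [if_pos hz]
        exact List.Nodup.append hnd (List.nodup_singleton t) (by simpa using htav)
      · rw [if_neg hz]; exact hnd
    obtain ⟨c1, c2, c3⟩ := ih d' av' hcnt2 hav2 hnd2
    rw [hstep]
    refine ⟨?_, ?_, c3⟩
    · intro u
      rw [c1 u, hgd']
      by_cases hut : u = t
      · subst hut; rw [if_pos rfl, hcts]; ring
      · rw [if_neg hut,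
          show (t :: rest).count u = rest.count u from List.count_cons_of_ne (fun e => hut e.symm) ]
    · intro u
      rw [c2 u, hmemav', hgd']
      by_cases hut : u = t
      · subst hut
        have h0 : (0 : Int) ≤ (rest.count u : Int) := by positivity
        constructor
        · rintro ((h | ⟨_, h1⟩) | ⟨hr, hdg⟩)
          · exact absurd h htav
          · -- d.getD u 0 = 1; then rest.count u = 0
            have hcr : (rest.count u : Int) ≤ d'.getD u 0 := by
              by_cases hm : u ∈ rest
              · exact hcnt2 u hm
              · rw [List.count_eq_zero_of_not_mem hm]; rw [hgd']; simp; omega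
            rw [hgd', if_pos rfl] at hcr
            refine Or.inr ⟨by simp, ?_⟩
            rw [hcts]
            omega
          · rw [if_pos rfl] at hdg
            exact Or.inr ⟨by simp, by rw [hcts]; omega⟩
        · rintro (h | ⟨_, hdg⟩)
          · exact absurd h htav
          · rw [hcts] at hdg
            by_cases h1 : d.getD u 0 = 1
            · exact Or.inl (Or.inr ⟨rfl, h1⟩)
            · have hpos : 0 < rest.count u := by omega
              refine Or.inr ⟨List.count_pos_iff.mp hpos, ?_⟩
              rw [if_pos rfl]; omega
      · have hcu : (t :: rest).count u = rest.count u := List.count_cons_of_ne (fun e => hut e.symm)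
        rw [if_neg hut, hcu]
        constructor
        · rintro ((h | ⟨he, _⟩) | ⟨hr, hdg⟩)
          · exact Or.inl h
          · exact absurd he hut
          · exact Or.inr ⟨List.mem_cons_of_mem _ hr, hdg⟩
        · rintro (h | ⟨hr, hdg⟩)
          · exact Or.inl (Or.inl h)
          · rcases List.mem_cons.mp hr with he | hr'
            · exact absurd he hut
            · exact Or.inr ⟨hr', hdg⟩

lemma chars_join_nil_snoc (A : List (List Char)) (c : List Char) :
    PySem.Chars.join [] (A ++ [c]) = PySem.Chars.join [] A ++ c := by
  induction A with
  | nil => simp [PySem.Chars.join_nil, PySem.Chars.join_singleton]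
  | cons a A ih =>
    cases A with
    | nil =>
      simp [PySem.Chars.join_singleton, PySem.Chars.join_cons_cons]
    | cons b B =>
      have ih' := ih
      simp only [List.cons_append, PySem.Chars.join_cons_cons] at ih' ⊢
      rw [ih']
      simp [List.append_assoc]

lemma join_snoc (l : List String) (s : String) :
    PySem.Str.join "" (l ++ [s]) = PySem.Str.join "" l ++ s := by
  simp only [PySem.Str.join, List.map_append, List.map_cons, List.map_nil]
  rw [show ("".toList : List Char) = [] from rfl]
  rw [chars_join_nil_snoc, String.ofList_append, String.ofList_toList]

lemma only_left_eq (steps : List String) (reqs : List (String × String)) :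
    getStepsOnlyLeftSide steps reqs =
      PySem.List.sorted
        (steps.filter (fun step => (reqs.filter (fun r => r.2 == step)).isEmpty))
        (fun s => s) := by
  unfold getStepsOnlyLeftSide
  rw [PySem.List.foldl_append_if_eq_filter]
  rw [List.nil_append]

lemma filter_avail_mem (steps : List String) (reqs : List (String × String)) (t : String) :
    t ∈ steps.filter (fun step => (reqs.filter (fun r => r.2 == step)).isEmpty) ↔
      t ∈ steps ∧ inDegN reqs t = 0 := by
  rw [List.mem_filter]
  constructor
  · rintro ⟨h1, h2⟩
    refine ⟨h1, ?_⟩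
    rw [List.isEmpty_iff, List.filter_eq_nil_iff] at h2
    exact List.countP_eq_zero.mpr h2
  · rintro ⟨h1, h2⟩
    refine ⟨h1, ?_⟩
    rw [List.isEmpty_iff, List.filter_eq_nil_iff]
    exact List.countP_eq_zero.mp h2

lemma loop_eq : ∀ (fuel : Nat) (steps : List String) (reqs : List (String × String))
    (avail : List String) (indeg : PySem.Dict String Int)
    (succs : PySem.Dict String (List String)) (ordL : List String),
    InvP steps reqs avail indeg succs →
    aLoop fuel (PySem.Str.join "" ordL) steps reqs =
      PySem.Str.join "" (bLoop fuel ordL avail indeg succs) := by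
  intro fuel
  induction fuel with
  | zero => intro steps reqs avail indeg succs ordL _; rfl
  | succ n ih =>
    intro steps reqs avail indeg succs ordL hInv
    obtain ⟨hndS, hndA, hmemA, hdeg, hsuc, hends⟩ := hInv
    by_cases hS : steps = []
    · subst hS
      have hA : avail = [] := by
        rw [List.eq_nil_iff_forall_not_mem]
        intro t ht
        exact absurd ((hmemA t).mp ht).1 (List.not_mem_nil)
      subst hA
      simp only [aLoop, bLoop, List.length_nil, gt_iff_lt, Nat.lt_irrefl, if_false]
      rw [show PySem.List.min? ([] : List String) (fun s => s) = none from
        (PySem.List.min?_eq_none_iff _ _).mpr rfl]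
    · have hlen : steps.length > 0 := List.length_pos_of_ne_nil hS
      have hLa : ∀ x, x ∈ steps.filter (fun step => (reqs.filter (fun r => r.2 == step)).isEmpty)
          ↔ x ∈ avail := by
        intro x; rw [filter_avail_mem, hmemA]
      cases hAv : avail with
      | nil =>
        have hL : steps.filter (fun step => (reqs.filter (fun r => r.2 == step)).isEmpty) = [] := by
          rw [List.eq_nil_iff_forall_not_mem]
          intro t ht
          exact absurd ((hLa t).mp ht) (by rw [hAv]; exact List.not_mem_nil)
        simp only [aLoop, bLoop]
        rw [if_pos hlen, only_left_eq, hL,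
          show PySem.List.sorted ([] : List String) (fun s => s) = [] from
            (PySem.List.sorted_eq_nil_iff _ _ _).mpr rfl,
          show PySem.List.min? ([] : List String) (fun s => s) = none from
            (PySem.List.min?_eq_none_iff _ _).mpr rfl]
      | cons a as =>
        rw [← hAv]
        have hAne : avail ≠ [] := by rw [hAv]; exact List.cons_ne_nil a as
        rcases hmn : PySem.List.min? avail (fun s => s) with _ | m
        · exact absurd ((PySem.List.min?_eq_none_iff _ _).mp hmn) hAne
        have hmA : m ∈ avail := PySem.List.min?_mem hmn
        obtain ⟨hmS, hmdeg⟩ := (hmemA m).mp hmA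
        -- A's sorted available list is nonempty and headed by m
        have hLne : steps.filter (fun step => (reqs.filter (fun r => r.2 == step)).isEmpty) ≠ [] :=
          List.ne_nil_of_mem ((hLa m).mpr hmA)
        rcases hsrt : PySem.List.sorted
            (steps.filter (fun step => (reqs.filter (fun r => r.2 == step)).isEmpty))
            (fun s => s) with _ | ⟨hd, tl⟩
        · exact absurd ((PySem.List.sorted_eq_nil_iff _ _ _).mp hsrt) hLne
        have hhd : hd = m := head_sorted_eq_min _ _ hLa hd tl hsrt m hmn
        subst hhd
        -- abbreviations for the new states
        set reqs' := reqs.filter (fun r => !(r.1 == hd)) with hreqs'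
        set steps' := PySem.Set.discard steps hd with hsteps'
        have hmemS' : ∀ t, t ∈ steps' ↔ t ∈ steps ∧ t ≠ hd := by
          intro t
          rw [hsteps']
          simp [PySem.Set.discard, List.mem_filter]
        have hndS' : steps'.Nodup := by
          rw [hsteps']; exact List.Nodup.filter _ hndS
        -- counting facts
        have hbs : succs.getD hd [] = (reqs.filter (fun r => r.1 == hd)).map (fun r => r.2) :=
          hsuc hd hmS
        have hcount_bs : ∀ t, (((reqs.filter (fun r => r.1 == hd)).map (fun r => r.2)).count t)
            = reqs.countP (fun r => r.2 == t && r.1 == hd) := by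
          intro t
          rw [List.count_eq_countP, List.countP_map, List.countP_filter]
          rfl
        have hdeg_split : ∀ t, inDegN reqs t =
            reqs.countP (fun r => r.2 == t && r.1 == hd) + inDegN reqs' t := by
          intro t
          rw [hreqs']
          unfold inDegN
          rw [List.countP_filter]
          exact countP_split reqs (fun r => r.2 == t) (fun r => r.1 == hd)
        have hbs_steps : ∀ t, t ∈ (reqs.filter (fun r => r.1 == hd)).map (fun r => r.2) →
            t ∈ steps := by
          intro t ht
          rcases List.mem_map.mp ht with ⟨r, hr, hrt⟩
          exact hrt ▸ (hends r (List.mem_of_mem_filter hr)).2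
        -- preconditions of fold_dec
        have hcnt1 : ∀ t ∈ (reqs.filter (fun r => r.1 == hd)).map (fun r => r.2),
            ((((reqs.filter (fun r => r.1 == hd)).map (fun r => r.2)).count t : Int))
              ≤ indeg.getD t 0 := by
          intro t ht
          rw [hdeg t (hbs_steps t ht), hcount_bs t]
          have := hdeg_split t
          omega
        have hav1 : ∀ t ∈ avail.erase hd, indeg.getD t 0 = 0 := by
          intro t ht
          have ht' : t ∈ avail := List.mem_of_mem_erase ht
          obtain ⟨hts, htz⟩ := (hmemA t).mp ht'
          rw [hdeg t hts, htz]; rfl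
        have hnd1 : (avail.erase hd).Nodup := List.Nodup.erase hd hndA
        obtain ⟨c1, c2, c3⟩ := fold_dec ((reqs.filter (fun r => r.1 == hd)).map (fun r => r.2))
          indeg (avail.erase hd) hcnt1 hav1 hnd1
        set st' := (((reqs.filter (fun r => r.1 == hd)).map (fun r => r.2)).foldl bDecStep
          (indeg, avail.erase hd)) with hst'
        -- new invariant
        have hInv' : InvP steps' reqs' st'.2 st'.1 succs := by
          refine ⟨hndS', c3, ?_, ?_, ?_, ?_⟩
          · -- membership of the new avail
            intro t
            rw [c2 t, List.Nodup.mem_erase_iff hndA, hmemS']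
            constructor
            · rintro (⟨hne, hav⟩ | ⟨hbsmem, hdg⟩)
              · obtain ⟨hts, hz⟩ := (hmemA t).mp hav
                have := hdeg_split t
                exact ⟨⟨hts, hne⟩, by omega⟩
              · have htS : t ∈ steps := hbs_steps t hbsmem
                have hpos : 0 < reqs.countP (fun r => r.2 == t && r.1 == hd) := by
                  rw [← hcount_bs t]
                  exact List.count_pos_iff.mpr hbsmem
                have hne : t ≠ hd := by
                  rintro rfl
                  have h1 := hdeg_split t
                  omega
                rw [hdeg t htS, hcount_bs t] at hdg
                have h1 := hdeg_split t
                have h2 : inDegN reqs t = reqs.countP (fun r => r.2 == t && r.1 == hd) := by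
                  exact_mod_cast hdg
                exact ⟨⟨htS, hne⟩, by omega⟩
            · rintro ⟨⟨htS, hne⟩, hz⟩
              by_cases hct : reqs.countP (fun r => r.2 == t && r.1 == hd) = 0
              · left
                have := hdeg_split t
                exact ⟨hne, (hmemA t).mpr ⟨htS, by omega⟩⟩
              · right
                have hpos : 0 < ((reqs.filter (fun r => r.1 == hd)).map (fun r => r.2)).count t := by
                  rw [hcount_bs t]; omega
                refine ⟨List.count_pos_iff.mp hpos, ?_⟩
                rw [hdeg t htS, hcount_bs t]
                have := hdeg_split t
                have : inDegN reqs t = reqs.countP (fun r => r.2 == t && r.1 == hd) := by omega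
                exact_mod_cast this
          · -- degrees match the remaining requirements
            intro t ht
            obtain ⟨htS, _⟩ := (hmemS' t).mp ht
            rw [c1 t, hdeg t htS, hcount_bs t]
            have := hdeg_split t
            omega
          · -- successor lists are unchanged for remaining steps
            intro u hu
            obtain ⟨huS, hune⟩ := (hmemS' u).mp hu
            rw [hsuc u huS, hreqs', List.filter_filter]
            congr 1
            apply List.filter_congr
            intro r _
            by_cases hru : r.1 = u
            · have h1 : (r.1 == u) = true := by simp [hru]
              have h2 : (r.1 == hd) = false := by simp [hru]; exact hune
              simp [h1, h2]
            · have h1 : (r.1 == u) = false := by simp [hru]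
              simp [h1]
          · -- endpoints of remaining requirements are remaining steps
            intro r hr
            rw [hreqs'] at hr
            have hr1 : r ∈ reqs := (List.mem_filter.mp hr).1
            have hrne : r.1 ≠ hd := by simpa using (List.mem_filter.mp hr).2
            obtain ⟨h1, h2⟩ := hends r hr1
            refine ⟨(hmemS' r.1).mpr ⟨h1, hrne⟩, (hmemS' r.2).mpr ⟨h2, ?_⟩⟩
            rintro rfl
            have : 0 < inDegN reqs r.2 := by
              unfold inDegN
              exact List.countP_pos_iff.mpr ⟨r, hr1, by simp⟩
            omega
        -- unfold one step of each loop
        have hrem : PySem.Set.remove? steps hd = some steps' :=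
          hsteps' ▸ PySem.Set.remove?_of_mem hmS
        have stepA : aLoop (n+1) (PySem.Str.join "" ordL) steps reqs =
            aLoop n (PySem.Str.join "" ordL ++ hd) steps' reqs' := by
          simp only [aLoop]
          rw [if_pos hlen, only_left_eq, hsrt]
          dsimp only
          rw [hrem]
        have stepB : bLoop (n+1) ordL avail indeg succs =
            bLoop n (ordL ++ [hd]) st'.2 st'.1 succs := by
          simp only [bLoop]
          rw [hmn]
          dsimp only
          rw [remove?_eq_some_erase avail hd hmA]
          simp only [Option.getD_some, hbs]
          rfl
        rw [stepA, stepB, ← join_snoc]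
        exact ih steps' reqs' st'.2 st'.1 succs (ordL ++ [hd]) hInv'

-- ===== VERDICT (by name: the statement is the Claim_ definition above) =====
theorem calc_step_order_spec : Claim_equal_calc_step_order := by
  unfold Claim_equal_calc_step_order
  intro reqs _ _
  unfold Spec_calc_step_order calc_step_order calc_step_order_alt
  rw [PySem.List.foldl_prod_mk (f := bBuildStepInd) (g := bBuildStepSuc)]
  set indeg0 := reqs.foldl bBuildStepInd PySem.Dict.empty with hind
  set succs0 := reqs.foldl bBuildStepSuc PySem.Dict.empty with hsuc0
  have hkeys : indeg0.keys = getUniqueSteps reqs := by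
    rw [hind, keys_build]
    rfl
  have hnodS : (getUniqueSteps reqs).Nodup :=
    nodup_steps_fold reqs PySem.Set.empty List.nodup_nil
  have hsize : indeg0.size = (getUniqueSteps reqs).length := by
    rw [← hkeys]
    simp [PySem.Dict.size, PySem.Dict.keys]
  have hgd : ∀ t, indeg0.getD t 0 = (inDegN reqs t : Int) := by
    intro t
    rw [hind, getD_build]
    simp [inDegN]
  have hsc : ∀ s, succs0.getD s [] = (reqs.filter (fun r => r.1 == s)).map (fun r => r.2) := by
    intro s
    rw [hsuc0]
    unfold bBuildStepSuc
    rw [PySem.Dict.getD_foldl_modify_append]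
    simp
  have havl : (indeg0.items.filter (fun p => p.2 == 0)).map (fun p => p.1)
      = (getUniqueSteps reqs).filter (fun k => indeg0.getD k 0 == 0) := by
    rw [PySem.Dict.items_eq_map_keys indeg0 (by rw [hkeys]; exact hnodS) 0,
      List.filter_map, List.map_map, hkeys]
    simp [Function.comp_def]
  have hInv : InvP (getUniqueSteps reqs) reqs
      ((indeg0.items.filter (fun p => p.2 == 0)).map (fun p => p.1)) indeg0 succs0 := by
    refine ⟨hnodS, ?_, ?_, fun t _ => hgd t, fun s _ => hsc s, ?_⟩
    · rw [havl]; exact List.Nodup.filter _ hnodS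
    · intro t
      rw [havl, List.mem_filter, hgd t]
      constructor
      · rintro ⟨h1, h2⟩
        refine ⟨h1, ?_⟩
        have : (inDegN reqs t : Int) = 0 := by simpa using h2
        exact_mod_cast this
      · rintro ⟨h1, h2⟩
        exact ⟨h1, by simp [h2]⟩
    · intro r hr
      unfold getUniqueSteps
      constructor
      · exact (mem_steps_fold reqs PySem.Set.empty r.1).mpr
          (Or.inr ⟨r, hr, Or.inl rfl⟩)
      · exact (mem_steps_fold reqs PySem.Set.empty r.2).mpr
          (Or.inr ⟨r, hr, Or.inr rfl⟩)
  show aLoop (getUniqueSteps reqs).length "" (getUniqueSteps reqs) reqs =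
    PySem.Str.join "" (bLoop indeg0.size []
      ((indeg0.items.filter (fun p => p.2 == 0)).map (fun p => p.1)) indeg0 succs0)
  rw [hsize]
  have := loop_eq (getUniqueSteps reqs).length (getUniqueSteps reqs) reqs
    ((indeg0.items.filter (fun p => p.2 == 0)).map (fun p => p.1)) indeg0 succs0 [] hInv
  rw [show ("" : String) = PySem.Str.join "" [] from rfl]
  exact this
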